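-- pv_equiv track=rewrite | github.com/Jaylenmm/aresSTAGE | app.py | namecase
-- ===== SOURCE A (Python) =====
-- def namecase(value: str) -> str:
--     try:
--         s = (value or '').strip()
--         if not s:
--             return ''
--         # Handle hyphens and apostrophes properly (e.g., O'Neal, St. Louis)
--         parts = []
--         for token in s.split(' '):
--             if not token:
--                 parts.append(token)
--                 continue
--             subtokens = token.split('-')
--             subcased = []
--             for st in subtokens:
--                 st_l = st.lower()
--                 if "'" in st_l:
--                     apos = st_l.split("'")
--                     apos = [a.capitalize() if a else a for a in apos]
--                     subcased.append("'".join(apos))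
--                 else:
--                     subcased.append(st_l.capitalize())
--             parts.append('-'.join(subcased))
--         return ' '.join(parts)
--     except Exception:
--         try:
--             return str(value)
--         except Exception:
--             return ''
-- ===== SOURCE B (Python) =====
-- def namecase(value: str) -> str:
--     try:
--         s = (value or '').strip()
--         if not s:
--             return ''
--         out = []
--         start = True
--         for c in s:
--             if c in " -'":
--                 out.append(c)
--                 start = True
--             else:
--                 out.append(c.upper() if start else c.lower())
--                 start = False
--         return ''.join(out)
--     except Exception:
--         try:
--             return str(value)
--         except Exception:
--             return ''
-- ===== Notes on version B (the rewrite author's own statement) =====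
-- stated objective: simpler
-- what changed: Replaces A's three levels of split/capitalize/join (on space, hyphen, apostrophe) by a single left-to-right scan over the stripped string with a boolean flag that marks the beginning of a segment.
import Mathlib
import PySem

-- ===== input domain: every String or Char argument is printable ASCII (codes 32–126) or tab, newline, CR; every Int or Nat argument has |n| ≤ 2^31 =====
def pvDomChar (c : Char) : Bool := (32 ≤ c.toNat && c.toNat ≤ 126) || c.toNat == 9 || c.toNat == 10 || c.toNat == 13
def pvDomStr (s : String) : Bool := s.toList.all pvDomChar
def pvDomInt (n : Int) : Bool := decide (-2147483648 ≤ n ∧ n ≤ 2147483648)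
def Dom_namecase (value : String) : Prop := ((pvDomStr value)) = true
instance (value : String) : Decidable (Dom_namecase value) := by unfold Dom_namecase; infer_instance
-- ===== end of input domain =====

-- B replaces A's nested space/hyphen/apostrophe splits and joins by a single
-- left-to-right scan with a boolean segment-start flag (objective: simpler).


-- ===== PORT A =====
-- str.capitalize: first char uppercased, rest lowercased (exact on the ASCII domain,
-- where title-casing a single char coincides with upperChar)
def pyCapitalize (cs : List Char) : List Char :=
  match cs with
  | [] => []
  | c :: rest => PySem.Chars.upperChar c :: PySem.Chars.lower rest

-- the body of A's inner 'for st in subtokens' loop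
def namecaseSub (st : List Char) : List Char :=
  let st_l := PySem.Chars.lower st
  if PySem.Chars.isIn ['\''] st_l then
    let apos := PySem.Chars.splitOn st_l ['\'']
    let apos := apos.map (fun a => if a ≠ [] then pyCapitalize a else a)
    PySem.Chars.join ['\''] apos
  else
    pyCapitalize st_l

-- the body of A's outer 'for token in s.split(' ')' loop (non-empty-token branch)
def namecaseToken (token : List Char) : List Char :=
  let subtokens := PySem.Chars.splitOn token ['-']
  let subcased := subtokens.foldl (fun acc st => acc ++ [namecaseSub st]) []
  PySem.Chars.join ['-'] subcased

def namecase (value : String) : String :=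
  -- 'value or '''' is 'value' for a str argument ('' stays ''); the try/except never
  -- fires for a str argument, so it has no Lean counterpart
  let s := (PySem.Str.strip value).toList
  if s = [] then "" else
  let parts := (PySem.Chars.splitOn s [' ']).foldl
    (fun acc token => if token = [] then acc ++ [token] else acc ++ [namecaseToken token]) []
  String.ofList (PySem.Chars.join [' '] parts)

-- ===== PORT B =====
-- one pass: a delimiter is copied and re-arms the flag; any other char is
-- uppercased when the flag is set, lowercased otherwise
def scanChars : List Char → Bool → List Char
  | [], _ => []
  | c :: cs, start =>
    if c = ' ' ∨ c = '-' ∨ c = '\'' then c :: scanChars cs true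
    else (if start then PySem.Chars.upperChar c else PySem.Chars.lowerChar c) :: scanChars cs false

def namecase_alt (value : String) : String :=
  let s := (PySem.Str.strip value).toList
  if s = [] then "" else String.ofList (scanChars s true)

-- ===== PRECONDITION & SPEC =====
def Spec_namecase (value : String) (out : String) : Prop := out = namecase_alt value
instance (value : String) (out : String) : Decidable (Spec_namecase value out) := by unfold Spec_namecase; infer_instance

-- ===== CLAIM (what is proved, stated in full; the proofs are below) =====
def Claim_equal_namecase : Prop := ∀ (value : String), Dom_namecase value → Spec_namecase value (namecase value)

-- ===== LEMMAS AND PROOFS =====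

-- structural reformulation of PySem.Chars.splitOn for a single-character separator
def split1 (d : Char) : List Char → List (List Char)
  | [] => [[]]
  | c :: cs =>
    if c = d then [] :: split1 d cs
    else match split1 d cs with
      | [] => [[c]]
      | h :: t => (c :: h) :: t

theorem split1_ne_nil (d : Char) (s : List Char) : split1 d s ≠ [] := by
  cases s with
  | nil => simp [split1]
  | cons c cs =>
    simp only [split1]
    split
    · simp
    · split <;> simp

theorem splitOn_go_eq (d : Char) (s : List Char) :
    ∀ (fuel : Nat) (cur : List Char) (acc : List (List Char)), s.length ≤ fuel →
      PySem.Chars.splitOn.go [d] fuel s cur acc =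
        acc.reverse ++ (match split1 d s with
          | [] => []
          | h :: t => (cur.reverse ++ h) :: t) := by
  induction s with
  | nil =>
    intro fuel cur acc _
    cases fuel <;> simp [PySem.Chars.splitOn.go, split1]
  | cons c cs ih =>
    intro fuel cur acc hf
    cases fuel with
    | zero => simp at hf
    | succ fuel =>
      simp only [PySem.Chars.splitOn.go]
      by_cases hcd : c = d
      · subst hcd
        rw [if_pos (by simp [List.isPrefixOf])]
        simp only [List.length_cons, List.length_nil, List.drop_succ_cons, List.drop_zero]
        rw [ih fuel [] (cur.reverse :: acc) (by simpa using Nat.le_of_succ_le_succ hf)]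
        have := split1_ne_nil c cs
        cases h : split1 c cs with
        | nil => exact absurd h this
        | cons hh tt => simp [split1, h]
      · have hpre : [d].isPrefixOf (c :: cs) = false := by
          simp [List.isPrefixOf]
          exact fun h => hcd h.symm
        simp only [hpre, Bool.false_eq_true, if_false]
        rw [ih fuel (c :: cur) acc (by simpa using Nat.le_of_succ_le_succ hf)]
        have := split1_ne_nil d cs
        cases h : split1 d cs with
        | nil => exact absurd h this
        | cons hh tt => simp [split1, h, hcd]

theorem splitOn_eq_split1 (d : Char) (s : List Char) :
    PySem.Chars.splitOn s [d] = split1 d s := by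
  rw [PySem.Chars.splitOn, splitOn_go_eq d s (s.length + 1) [] [] (by omega)]
  have := split1_ne_nil d s
  cases h : split1 d s with
  | nil => exact absurd h this
  | cons hh tt => simp

-- characters of split1 segments come from s, and the separator never occurs in them
theorem mem_of_mem_split1 (d : Char) (s : List Char) (x : List Char)
    (hx : x ∈ split1 d s) : (∀ c ∈ x, c ∈ s) ∧ d ∉ x := by
  induction s generalizing x with
  | nil => simp [split1] at hx; subst hx; simp
  | cons c cs ih =>
    simp only [split1] at hx
    split at hx
    · rename_i hcd
      rcases List.mem_cons.mp hx with rfl | hx'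
      · simp
      · obtain ⟨h1, h2⟩ := ih x hx'
        exact ⟨fun a ha => List.mem_cons_of_mem _ (h1 a ha), h2⟩
    · rename_i hcd
      rcases hsp : split1 d cs with _ | ⟨h, t⟩
      · exact absurd hsp (split1_ne_nil d cs)
      · rw [hsp] at hx
        rcases List.mem_cons.mp hx with rfl | hx'
        · have hh : h ∈ split1 d cs := by rw [hsp]; simp
          obtain ⟨h1, h2⟩ := ih h hh
          constructor
          · intro a ha
            rcases List.mem_cons.mp ha with rfl | ha'
            · simp
            · exact List.mem_cons_of_mem _ (h1 a ha')
          · intro hd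
            rcases List.mem_cons.mp hd with rfl | hd'
            · exact hcd rfl
            · exact h2 hd'
        · have ht : x ∈ split1 d cs := by rw [hsp]; simp [hx']
          obtain ⟨h1, h2⟩ := ih x ht
          exact ⟨fun a ha => List.mem_cons_of_mem _ (h1 a ha), h2⟩

-- ASCII char facts
theorem toNat_ofNat_small (n : Nat) (h : n ≤ 122) : (Char.ofNat n).toNat = n := by
  unfold Char.ofNat Char.ofNatAux
  rw [dif_pos (by constructor <;> omega)]
  simp [Char.toNat]

theorem isupper_iff (c : Char) : PySem.Chars.isupper c = true ↔ (65 ≤ c.toNat ∧ c.toNat ≤ 90) := by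
  simp only [PySem.Chars.isupper, Char.le_def, Bool.and_eq_true, decide_eq_true_iff]
  unfold Char.toNat
  exact Iff.rfl

theorem islower_iff (c : Char) : PySem.Chars.islower c = true ↔ (97 ≤ c.toNat ∧ c.toNat ≤ 122) := by
  simp only [PySem.Chars.islower, Char.le_def, Bool.and_eq_true, decide_eq_true_iff]
  unfold Char.toNat
  exact Iff.rfl

theorem char_eq_iff (c d : Char) : c = d ↔ c.toNat = d.toNat := by
  constructor
  · rintro rfl; rfl
  · intro h
    apply Char.ext
    unfold Char.toNat at h
    exact UInt32.toNat_inj.mp h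

theorem lowerChar_lowerChar (c : Char) :
    PySem.Chars.lowerChar (PySem.Chars.lowerChar c) = PySem.Chars.lowerChar c := by
  unfold PySem.Chars.lowerChar
  by_cases hu : PySem.Chars.isupper c = true
  · rw [if_pos hu]
    obtain ⟨h1, h2⟩ := (isupper_iff c).mp hu
    rw [if_neg]
    intro hup
    obtain ⟨_, h4⟩ := (isupper_iff _).mp hup
    rw [toNat_ofNat_small (c.toNat + 32) (by omega)] at h4
    omega
  · rw [if_neg hu, if_neg hu]

theorem upperChar_lowerChar (c : Char) :
    PySem.Chars.upperChar (PySem.Chars.lowerChar c) = PySem.Chars.upperChar c := by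
  unfold PySem.Chars.upperChar PySem.Chars.lowerChar
  by_cases hu : PySem.Chars.isupper c = true
  · rw [if_pos hu]
    obtain ⟨h1, h2⟩ := (isupper_iff c).mp hu
    have hlo : PySem.Chars.islower (Char.ofNat (c.toNat + 32)) = true := by
      rw [islower_iff, toNat_ofNat_small _ (by omega)]
      omega
    rw [if_pos hlo]
    have hnl : ¬ PySem.Chars.islower c = true := by
      intro hl
      obtain ⟨h3, _⟩ := (islower_iff c).mp hl
      omega
    rw [if_neg hnl, toNat_ofNat_small (c.toNat + 32) (by omega)]
    rw [char_eq_iff, toNat_ofNat_small (c.toNat + 32 - 32) (by omega)]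
    omega
  · rw [if_neg hu]

theorem lowerChar_eq_iff_of_small (c d : Char) (hd : d.toNat < 65) :
    PySem.Chars.lowerChar c = d ↔ c = d := by
  unfold PySem.Chars.lowerChar
  by_cases hu : PySem.Chars.isupper c = true
  · rw [if_pos hu]
    obtain ⟨h1, h2⟩ := (isupper_iff c).mp hu
    constructor
    · intro h
      rw [char_eq_iff, toNat_ofNat_small (c.toNat + 32) (by omega)] at h
      omega
    · intro h
      rw [char_eq_iff] at h ⊢
      rw [toNat_ofNat_small (c.toNat + 32) (by omega)]
      omega
  · rw [if_neg hu]

-- lower distributes over apostrophe-splitting (''' is below 'a', fixed by lowerChar)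
theorem split1_lower (s : List Char) :
    split1 '\'' (PySem.Chars.lower s) = (split1 '\'' s).map PySem.Chars.lower := by
  induction s with
  | nil => simp [split1, PySem.Chars.lower]
  | cons c cs ih =>
    have ih' : split1 '\'' (List.map PySem.Chars.lowerChar cs)
        = List.map PySem.Chars.lower (split1 '\'' cs) := ih
    simp only [PySem.Chars.lower, List.map_cons]
    simp only [split1]
    by_cases hc : c = '\''
    · subst hc
      rw [show PySem.Chars.lowerChar '\'' = '\'' from by decide]
      rw [if_pos rfl, if_pos rfl, ih']
      simp [PySem.Chars.lower]
    · rw [if_neg (fun h => hc ((lowerChar_eq_iff_of_small c '\'' (by decide)).mp h)), if_neg hc]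
      rcases h : split1 '\'' cs with _ | ⟨hh, tt⟩
      · exact absurd h (split1_ne_nil _ _)
      · rw [h] at ih'
        rw [ih']
        simp [PySem.Chars.lower]

-- a single-char membership test via isIn
theorem isIn_single_iff (d : Char) (s : List Char) :
    PySem.Chars.isIn [d] s = true ↔ d ∈ s := by
  rw [PySem.Chars.isIn_iff_infix]
  constructor
  · rintro ⟨p, q, hs⟩
    subst hs; simp
  · intro h
    obtain ⟨p, q, hs⟩ := List.append_of_mem h
    exact ⟨p, q, by simp [hs]⟩

-- B's scan on a delimiter-free segment: capitalize when the flag is set, lower otherwise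
theorem scan_atom (x : List Char) (hsp : ' ' ∉ x) (hhy : '-' ∉ x) (hap : '\'' ∉ x) :
    ∀ b, scanChars x b = if b then pyCapitalize (PySem.Chars.lower x) else PySem.Chars.lower x := by
  induction x with
  | nil => intro b; cases b <;> simp [scanChars, pyCapitalize, PySem.Chars.lower]
  | cons c cs ih =>
    intro b
    have hc : ¬ (c = ' ' ∨ c = '-' ∨ c = '\'') := by
      rintro (rfl | rfl | rfl)
      · exact hsp (by simp)
      · exact hhy (by simp)
      · exact hap (by simp)
    have ih' := ih (fun h => hsp (by simp [h])) (fun h => hhy (by simp [h])) (fun h => hap (by simp [h]))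
    simp only [scanChars, if_neg hc]
    rw [ih' false]
    cases b with
    | false =>
      simp [PySem.Chars.lower]
    | true =>
      simp only [if_pos, PySem.Chars.lower, List.map_cons, pyCapitalize]
      rw [upperChar_lowerChar]
      simp only [PySem.Chars.lower, List.map_map, List.cons.injEq, true_and]
      exact (List.map_congr_left (fun a _ => by
        simp only [Function.comp_apply, lowerChar_lowerChar])).symm

-- the key distribution law: scanning s equals splitting at a delimiter d,
-- scanning the first segment with the incoming flag and the rest afresh, and re-joining
theorem scan_split1 (d : Char) (hd : d = ' ' ∨ d = '-' ∨ d = '\'') (s : List Char) (b : Bool) :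
    scanChars s b = PySem.Chars.join [d]
      (match split1 d s with
        | [] => []
        | h :: t => scanChars h b :: t.map (fun x => scanChars x true)) := by
  induction s generalizing b with
  | nil => simp [split1, scanChars, PySem.Chars.join_singleton]
  | cons c cs ih =>
    by_cases hcd : c = d
    · subst hcd
      rcases h : split1 c cs with _ | ⟨hh, tt⟩
      · exact absurd h (split1_ne_nil _ _)
      · have hsplit : split1 c (c :: cs) = [] :: hh :: tt := by
          simp [split1, h]
        rw [hsplit]
        have ihx : scanChars cs true
            = PySem.Chars.join [c] (scanChars hh true :: tt.map (fun x => scanChars x true)) := by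
          rw [ih true, h]
        simp only [scanChars, if_pos hd, List.map_cons]
        rw [PySem.Chars.join_cons_cons, ihx]
        simp
    · rcases h : split1 d cs with _ | ⟨hh, tt⟩
      · exact absurd h (split1_ne_nil _ _)
      · have hsplit : split1 d (c :: cs) = (c :: hh) :: tt := by
          simp [split1, if_neg hcd, h]
        rw [hsplit]
        by_cases hdelim : c = ' ' ∨ c = '-' ∨ c = '\''
        · -- c is another delimiter: flag resets, but the char stays in the segment head
          have ihx : scanChars cs true
              = PySem.Chars.join [d] (scanChars hh true :: tt.map (fun x => scanChars x true)) := by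
            rw [ih true, h]
          simp only [scanChars, if_pos hdelim, List.map_cons]
          rw [ihx]
          cases tt with
          | nil => simp [PySem.Chars.join_singleton]
          | cons y ys =>
            rw [List.map_cons, PySem.Chars.join_cons_cons, PySem.Chars.join_cons_cons]
            simp
        · have ihx : scanChars cs false
              = PySem.Chars.join [d] (scanChars hh false :: tt.map (fun x => scanChars x true)) := by
            rw [ih false, h]
          simp only [scanChars, if_neg hdelim, List.map_cons]
          rw [ihx]
          cases tt with
          | nil => simp [PySem.Chars.join_singleton]
          | cons y ys =>
            rw [List.map_cons, PySem.Chars.join_cons_cons, PySem.Chars.join_cons_cons]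
            simp

-- with an incoming flag of true, the distribution law is a plain map over the segments
theorem scan_split1_true (d : Char) (hd : d = ' ' ∨ d = '-' ∨ d = '\'') (s : List Char) :
    scanChars s true = PySem.Chars.join [d] ((split1 d s).map (fun x => scanChars x true)) := by
  rw [scan_split1 d hd s true]
  rcases h : split1 d s with _ | ⟨hh, tt⟩
  · exact absurd h (split1_ne_nil _ _)
  · simp

-- A's apostrophe handling on a space/hyphen-free segment equals B's scan
theorem namecaseSub_eq_scan (st : List Char) (hsp : ' ' ∉ st) (hhy : '-' ∉ st) :
    namecaseSub st = scanChars st true := by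
  have hmem : '\'' ∈ PySem.Chars.lower st ↔ '\'' ∈ st := by
    simp only [PySem.Chars.lower, List.mem_map]
    constructor
    · rintro ⟨a, ha, hla⟩
      rw [lowerChar_eq_iff_of_small a '\'' (by decide)] at hla
      rwa [hla] at ha
    · intro h
      exact ⟨'\'', h, by decide⟩
  have hif : (fun a => if a ≠ ([] : List Char) then pyCapitalize a else a) = pyCapitalize := by
    funext a
    cases a <;> simp [pyCapitalize]
  unfold namecaseSub
  by_cases hap : '\'' ∈ st
  · rw [if_pos ((isIn_single_iff _ _).mpr (hmem.mpr hap))]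
    rw [splitOn_eq_split1, split1_lower, hif]
    show PySem.Chars.join ['\'']
        (List.map pyCapitalize (List.map PySem.Chars.lower (split1 '\'' st))) = scanChars st true
    rw [List.map_map, scan_split1_true '\'' (Or.inr (Or.inr rfl)) st]
    congr 1
    apply List.map_congr_left
    intro x hx
    obtain ⟨hsub, hnot⟩ := mem_of_mem_split1 '\'' st x hx
    rw [scan_atom x (fun hy => hsp (hsub _ hy)) (fun hy => hhy (hsub _ hy)) hnot true]
    simp [Function.comp]
  · rw [if_neg (by rw [isIn_single_iff]; exact fun h => hap (hmem.mp h))]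
    rw [scan_atom st hsp hhy hap true]
    simp

-- A's per-token processing on a space-free token equals B's scan
theorem namecaseToken_eq_scan (token : List Char) (hsp : ' ' ∉ token) :
    namecaseToken token = scanChars token true := by
  unfold namecaseToken
  show PySem.Chars.join ['-']
      (List.foldl (fun acc st => acc ++ [namecaseSub st]) [] (PySem.Chars.splitOn token ['-']))
    = scanChars token true
  rw [show List.foldl (fun acc st => acc ++ [namecaseSub st]) [] (PySem.Chars.splitOn token ['-'])
      = (PySem.Chars.splitOn token ['-']).map namecaseSub from by
    simpa using PySem.List.foldl_append_singleton_eq_map namecaseSub (PySem.Chars.splitOn token ['-']) []]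
  rw [splitOn_eq_split1, scan_split1_true '-' (Or.inr (Or.inl rfl)) token]
  congr 1
  apply List.map_congr_left
  intro x hx
  obtain ⟨hsub, hnot⟩ := mem_of_mem_split1 '-' token x hx
  exact namecaseSub_eq_scan x (fun hy => hsp (hsub _ hy)) hnot

theorem chars_eq (s : List Char) :
    PySem.Chars.join [' ']
      ((PySem.Chars.splitOn s [' ']).foldl
        (fun acc token => if token = [] then acc ++ [token] else acc ++ [namecaseToken token]) [])
    = scanChars s true := by
  have hfun : (fun (acc : List (List Char)) token =>
      if token = [] then acc ++ [token] else acc ++ [namecaseToken token])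
      = fun acc token => acc ++ [if token = [] then token else namecaseToken token] := by
    funext acc token
    split_ifs <;> rfl
  rw [hfun]
  rw [show List.foldl (fun acc token =>
        acc ++ [if token = [] then token else namecaseToken token]) [] (PySem.Chars.splitOn s [' '])
      = (PySem.Chars.splitOn s [' ']).map (fun token => if token = [] then token else namecaseToken token) from by
    simpa using PySem.List.foldl_append_singleton_eq_map
      (fun token => if token = [] then token else namecaseToken token) (PySem.Chars.splitOn s [' ']) []]
  rw [splitOn_eq_split1, scan_split1_true ' ' (Or.inl rfl) s]
  congr 1
  apply List.map_congr_left
  intro token htok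
  obtain ⟨hsub, hnot⟩ := mem_of_mem_split1 ' ' s token htok
  by_cases ht : token = []
  · subst ht
    simp [scanChars]
  · rw [if_neg ht, namecaseToken_eq_scan token hnot]

-- ===== VERDICT (by name: the statement is the Claim_ definition above) =====
theorem namecase_spec : Claim_equal_namecase := by
  intro value _
  unfold Spec_namecase namecase namecase_alt
  simp only []
  by_cases h : (PySem.Str.strip value).toList = []
  · rw [if_pos h, if_pos h]
  · rw [if_neg h, if_neg h, chars_eq]
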